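-- pv_equiv track=rewrite | github.com/rocky-mtn-high/DynamicProgrammingProj | algo.py | max_wood_traceback
-- ===== SOURCE A (Python) =====
-- def max_wood_traceback(segments):
--     n = len(segments)
--     dp = [[0] * n for _ in range(n)]
--     parent = [[None] * n for _ in range(n)]
--
--     segment_sums = [0] * (n + 1)
--     for i in range(1, n + 1):
--         segment_sums[i] = segment_sums[i - 1] + segments[i - 1]
--
--     ##fill in segments
--     for i in range(n):
--         dp[i][i] = segments[i]
--         parent[i][i] = 'S'
--     ##compute table
--     for length in range(2, n + 1):
--         for i in range(n - length + 1):
--             j = i + length - 1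
--             total_left = segment_sums[j + 1] - segment_sums[i]
--             dp[i][j] = total_left - min(dp[i + 1][j], dp[i][j - 1])
--
--             ##updating parent cells
--             left = dp[i + 1][j]
--             right = dp[i][j - 1]
--
--             if left < right or  left == right: ##tiebreakjer
--                 dp[i][j] = total_left - left
--                 parent[i][j] = 'L'
--             else:
--                 dp[i][j] = total_left - right
--                 parent[i][j] = 'R'
--
--     ##Do traceback based on indices across table
--     order = []
--     i, j = 0, n - 1
--     while i < j:
--         if parent[i][j] == 'L':
--             order.append(i)
--             i += 1
--         else: ##this is if parent = R
--             order.append(j)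
--             j -= 1
--     if i ==j:
--         order.append(i)
--
--
--     return dp[0][n - 1], [idx + 1 for idx in order]
-- ===== SOURCE B (Python) =====
-- def max_wood_traceback(segments):
--     n = len(segments)
--     memo = {}
--
--     def diff(i, j):
--         # best achievable (mover minus opponent) score difference on segments[i..j]
--         if (i, j) in memo:
--             return memo[(i, j)]
--         if i == j:
--             d = segments[i]
--         else:
--             d = max(segments[i] - diff(i + 1, j), segments[j] - diff(i, j - 1))
--         memo[(i, j)] = d
--         return d
--
--     best = diff(0, n - 1)
--     order = []
--     i, j = 0, n - 1
--     while i < j: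
--         if segments[i] - memo[(i + 1, j)] >= segments[j] - memo[(i, j - 1)]:
--             order.append(i + 1)
--             i += 1
--         else:
--             order.append(j + 1)
--             j -= 1
--     order.append(i + 1)
--     return (sum(segments) + best) // 2, order
-- ===== Notes on version B (the rewrite author's own statement) =====
-- stated objective: alternative
-- what changed: Replaces A's bottom-up table DP (two n-by-n matrices, prefix-sum array, length-major fill, parent-pointer traceback) by a top-down memoized recursion on the score-DIFFERENCE game D(i,j)=max(s[i]-D(i+1,j), s[j]-D(i,j-1)) with no prefix sums and no parent table; the answer is (sum(segments)+D(0,n-1))//2 and the order is rebuilt by re-comparing the two memoized differences (tie toward the left end).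
import Mathlib
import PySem

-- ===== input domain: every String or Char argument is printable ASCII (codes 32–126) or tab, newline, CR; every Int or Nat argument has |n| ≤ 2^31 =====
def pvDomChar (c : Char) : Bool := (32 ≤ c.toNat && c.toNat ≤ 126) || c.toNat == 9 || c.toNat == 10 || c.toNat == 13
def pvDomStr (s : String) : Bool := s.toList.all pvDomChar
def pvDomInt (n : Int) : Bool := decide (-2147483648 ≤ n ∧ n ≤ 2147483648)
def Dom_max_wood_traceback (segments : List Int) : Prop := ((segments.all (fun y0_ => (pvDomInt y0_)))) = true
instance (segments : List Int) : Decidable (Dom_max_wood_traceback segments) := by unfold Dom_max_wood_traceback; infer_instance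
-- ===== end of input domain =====

-- B replaces A's bottom-up table DP (dp + parent matrices, prefix sums, length-major fill)
-- by a top-down memoized recursion on the score-DIFFERENCE game
-- D(i,j) = max(s[i] - D(i+1,j), s[j] - D(i,j-1)), answer (sum + D(0,n-1)) // 2,
-- traceback by re-comparing the two sub-differences (tie toward the left end);
-- alternative decomposition, no speed claim.

-- ===== PORT A =====
-- the 'while i < j' traceback loop of A, as recursion on j - i
def tbA (par : List (List (Option String))) (i j : Int) (acc : List Int) : List Int :=
  if _h : i < j then
    if PySem.List.pyGetD (PySem.List.pyGetD par i []) j none == some "L" then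
      tbA par (i + 1) j (acc ++ [i])
    else
      tbA par i (j - 1) (acc ++ [j])
  else if i == j then acc ++ [i] else acc
termination_by (j - i).toNat
decreasing_by all_goals omega

def max_wood_traceback (segments : List Int) : Int × List Int :=
  let n := segments.length
  let dp0 := List.replicate n (List.replicate n (0 : Int))
  let par0 := List.replicate n (List.replicate n (none : Option String))
  -- segment_sums
  let ss := (PySem.List.pyRange 1 ((n : Int) + 1) 1).foldl
      (fun ss i =>
        PySem.List.pySetD ss i (PySem.List.pyGetD ss (i - 1) 0 + PySem.List.pyGetD segments (i - 1) 0))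
      (List.replicate (n + 1) (0 : Int))
  -- fill in segments
  let st1 := (PySem.List.pyRange 0 (n : Int) 1).foldl
      (fun (st : List (List Int) × List (List (Option String))) i =>
        (PySem.List.pySetD st.1 i
           (PySem.List.pySetD (PySem.List.pyGetD st.1 i []) i (PySem.List.pyGetD segments i 0)),
         PySem.List.pySetD st.2 i
           (PySem.List.pySetD (PySem.List.pyGetD st.2 i []) i (some "S"))))
      (dp0, par0)
  -- compute table
  let st2 := (PySem.List.pyRange 2 ((n : Int) + 1) 1).foldl
      (fun st length =>
        (PySem.List.pyRange 0 ((n : Int) - length + 1) 1).foldl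
          (fun (st : List (List Int) × List (List (Option String))) i =>
            let j := i + length - 1
            let total_left := PySem.List.pyGetD ss (j + 1) 0 - PySem.List.pyGetD ss i 0
            let dpA := PySem.List.pySetD st.1 i
                (PySem.List.pySetD (PySem.List.pyGetD st.1 i []) j
                  (total_left -
                    min (PySem.List.pyGetD (PySem.List.pyGetD st.1 (i + 1) []) j 0)
                        (PySem.List.pyGetD (PySem.List.pyGetD st.1 i []) (j - 1) 0)))
            let left := PySem.List.pyGetD (PySem.List.pyGetD dpA (i + 1) []) j 0
            let right := PySem.List.pyGetD (PySem.List.pyGetD dpA i []) (j - 1) 0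
            if left < right ∨ left = right then
              (PySem.List.pySetD dpA i
                 (PySem.List.pySetD (PySem.List.pyGetD dpA i []) j (total_left - left)),
               PySem.List.pySetD st.2 i
                 (PySem.List.pySetD (PySem.List.pyGetD st.2 i []) j (some "L")))
            else
              (PySem.List.pySetD dpA i
                 (PySem.List.pySetD (PySem.List.pyGetD dpA i []) j (total_left - right)),
               PySem.List.pySetD st.2 i
                 (PySem.List.pySetD (PySem.List.pyGetD st.2 i []) j (some "R"))))
          st)
      st1
  let order := tbA st2.2 0 ((n : Int) - 1) []
  (PySem.List.pyGetD (PySem.List.pyGetD st2.1 0 []) ((n : Int) - 1) 0,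
   order.map (fun idx => idx + 1))

-- ===== PORT B =====
-- Source B's diff(i, j): the memo dict only caches repeated calls, every cached entry holds the
-- value this recursion computes, so the port is the recursion itself; Python's base case is
-- i == j and i > j is unreachable from the calls B makes (Pre_ excludes the empty list), the
-- 'i < j' guard only makes the Lean function total.
def diffD (s : List Int) (i j : Int) : Int :=
  if _h : i < j then
    max (PySem.List.pyGetD s i 0 - diffD s (i + 1) j)
        (PySem.List.pyGetD s j 0 - diffD s i (j - 1))
  else PySem.List.pyGetD s i 0
termination_by (j - i).toNat
decreasing_by all_goals omega

-- the 'while i < j' traceback loop of B: memo[(i+1,j)] / memo[(i,j-1)] hold diff's values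
def tbB (s : List Int) (i j : Int) (acc : List Int) : List Int :=
  if _h : i < j then
    if PySem.List.pyGetD s j 0 - diffD s i (j - 1) ≤ PySem.List.pyGetD s i 0 - diffD s (i + 1) j then
      tbB s (i + 1) j (acc ++ [i + 1])
    else
      tbB s i (j - 1) (acc ++ [j + 1])
  else acc ++ [i + 1]
termination_by (j - i).toNat
decreasing_by all_goals omega

def max_wood_traceback_alt (segments : List Int) : Int × List Int :=
  let n := segments.length
  let best := diffD segments 0 ((n : Int) - 1)
  let order := tbB segments 0 ((n : Int) - 1) []
  (PySem.Int.floordiv (segments.sum + best) 2, order)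

-- ===== PRECONDITION & SPEC =====
-- A raises (IndexError at dp[0][-1]) on the empty list, B raises IndexError there too: excluded.
def Pre_max_wood_traceback (segments : List Int) : Prop := segments ≠ []
instance (segments : List Int) : Decidable (Pre_max_wood_traceback segments) := by
  unfold Pre_max_wood_traceback; infer_instance
def pvWitness_max_wood_traceback : List Int := [4, 7, 2, 9]

def Spec_max_wood_traceback (segments : List Int) (out : Int × List Int) : Prop :=
  out = max_wood_traceback_alt segments
instance (segments : List Int) (out : Int × List Int) : Decidable (Spec_max_wood_traceback segments out) := by
  unfold Spec_max_wood_traceback; infer_instance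

-- ===== CLAIM (what is proved, stated in full; the proofs are below) =====
def Claim_equal_max_wood_traceback : Prop :=
  ∀ (segments : List Int), Dom_max_wood_traceback segments →
    Pre_max_wood_traceback segments →
    Spec_max_wood_traceback segments (max_wood_traceback segments)

-- ===== LEMMAS AND PROOFS =====

-- pure model: prefix sums, the range-value function F, and the pure 0-based traceback tb0
def psum (s : List Int) (k : Nat) : Int := (s.take k).sum

def F (s : List Int) (i j : Nat) : Int :=
  if i < j then psum s (j + 1) - psum s i - min (F s (i + 1) j) (F s i (j - 1))
  else s.getD i 0
termination_by j - i
decreasing_by all_goals omega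

def tb0 (s : List Int) (i j : Nat) : List Int :=
  if i < j then
    if F s (i + 1) j ≤ F s i (j - 1) then (i : Int) :: tb0 s (i + 1) j
    else (j : Int) :: tb0 s i (j - 1)
  else [(i : Int)]
termination_by j - i
decreasing_by all_goals omega


-- generic facts about List.set / nested tables used by both loop proofs
theorem getD_set_ite {α : Type} (l : List α) (i k : Nat) (v d : α) :
    (l.set i v).getD k d = if k = i ∧ i < l.length then v else l.getD k d := by
  rcases Nat.lt_or_ge i l.length with h | h
  · by_cases hk : k = i
    · subst hk; simp [List.getD, h]
    · simp [List.getD, hk, List.getElem?_set_ne (by omega : i ≠ k)]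
  · rw [if_neg (by omega), List.set_eq_of_length_le (by omega)]

-- one cell of a nested table, and a single-cell update (the shape A's loop bodies reduce to)
def cellg {α : Type} (d : α) (t : List (List α)) (i j : Nat) : α := (t.getD i []).getD j d

def upd {α : Type} (t : List (List α)) (i j : Nat) (v : α) : List (List α) :=
  t.set i ((t.getD i []).set j v)

def RowsOk {α : Type} (t : List (List α)) (n : Nat) : Prop :=
  t.length = n ∧ ∀ i, i < n → (t.getD i []).length = n

theorem cellg_upd_self {α : Type} (d : α) (t : List (List α)) (n i j : Nat) (v : α)
    (ht : RowsOk t n) (hi : i < n) (hj : j < n) :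
    cellg d (upd t i j v) i j = v := by
  obtain ⟨h1, h2⟩ := ht
  rw [cellg, upd, getD_set_ite, if_pos ⟨rfl, by omega⟩, getD_set_ite,
    if_pos ⟨rfl, by rw [h2 i hi]; omega⟩]

theorem cellg_upd_other {α : Type} (d : α) (t : List (List α)) (i j i' j' : Nat) (v : α)
    (h : i' ≠ i ∨ j' ≠ j) :
    cellg d (upd t i j v) i' j' = cellg d t i' j' := by
  rw [cellg, upd, getD_set_ite, cellg]
  by_cases hc : i' = i ∧ i < t.length
  · rw [if_pos hc, hc.1, getD_set_ite, if_neg (by tauto)]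
  · rw [if_neg hc]

theorem rowsOk_upd {α : Type} (t : List (List α)) (n i j : Nat) (v : α)
    (ht : RowsOk t n) : RowsOk (upd t i j v) n := by
  obtain ⟨h1, h2⟩ := ht
  refine ⟨by simp [upd, h1], fun k hk => ?_⟩
  rw [upd, getD_set_ite]
  by_cases hki : k = i ∧ i < t.length
  · rw [if_pos hki]
    rw [List.length_set]
    exact h2 i (by omega)
  · rw [if_neg hki]; exact h2 k hk

-- fold-with-invariant schemes for the two range shapes A uses
theorem foldl_pyRange_inv {σ : Type} (a : Int) (len : Nat) (f : σ → Int → σ)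
    (P : Nat → σ → Prop) (init : σ)
    (h0 : P 0 init)
    (hstep : ∀ m s, m < len → P m s → P (m + 1) (f s (a + (m : Int)))) :
    P len ((PySem.List.pyRange a (a + (len : Int)) 1).foldl f init) := by
  induction len with
  | zero => simpa [PySem.List.pyRange_one_eq_nil] using h0
  | succ k ih =>
      have hcast : a + ((k + 1 : Nat) : Int) = (a + (k : Int)) + 1 := by push_cast; ring
      rw [hcast, PySem.List.pyRange_one_succ_right (by omega), List.foldl_append]
      exact hstep k _ (by omega) (ih (fun m s hm => hstep m s (by omega)))

theorem foldl_pyRange_zero_inv {σ : Type} (len : Nat) (f : σ → Int → σ)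
    (P : Nat → σ → Prop) (init : σ)
    (h0 : P 0 init)
    (hstep : ∀ m s, m < len → P m s → P (m + 1) (f s (m : Int))) :
    P len ((PySem.List.pyRange 0 (len : Int) 1).foldl f init) := by
  have := foldl_pyRange_inv 0 len f P init h0 (by simpa using hstep)
  simpa using this

-- prefix sums: psum characterisations
theorem psum_succ (s : List Int) (m : Nat) (hm : m < s.length) :
    psum s (m + 1) = psum s m + s.getD m 0 := by
  rw [psum, psum, List.take_add_one, List.sum_append, List.getD,
    List.getElem?_eq_getElem hm]
  simp


theorem F_diag (s : List Int) (i : Nat) : F s i i = s.getD i 0 := by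
  rw [F, if_neg (by omega)]

theorem F_step (s : List Int) (i j : Nat) (h : i < j) :
    F s i j = psum s (j + 1) - psum s i - min (F s (i + 1) j) (F s i (j - 1)) := by
  rw [F, if_pos h]

-- loop invariants: the dp / parent cells computed so far agree with F
def GoodDp (s : List Int) (dp : List (List Int)) (L : Nat) : Prop :=
  ∀ i j : Nat, i ≤ j → j < s.length → j - i < L → cellg 0 dp i j = F s i j

def GoodPar (s : List Int) (par : List (List (Option String))) (L : Nat) : Prop :=
  ∀ i j : Nat, i < j → j < s.length → j - i < L →
    cellg none par i j = some (if F s (i + 1) j ≤ F s i (j - 1) then "L" else "R")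

theorem tbA_eq (s : List Int) (par : List (List (Option String)))
    (hpar : ∀ i j : Nat, i < j → j < s.length →
      cellg none par i j = some (if F s (i + 1) j ≤ F s i (j - 1) then "L" else "R"))
    (i j : Nat) (hij : i ≤ j) (hj : j < s.length) (acc : List Int) :
    tbA par (i : Int) (j : Int) acc = acc ++ tb0 s i j := by
  rw [tbA]
  by_cases hlt : i < j
  · rw [dif_pos (by exact_mod_cast hlt)]
    have hcell : PySem.List.pyGetD (PySem.List.pyGetD par (i : Int) []) (j : Int) none
        = cellg none par i j := by
      simp [cellg]
    rw [hcell, hpar i j hlt hj]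
    by_cases hc : F s (i + 1) j ≤ F s i (j - 1)
    · have ht : tb0 s i j = (i : Int) :: tb0 s (i + 1) j := by
        rw [tb0, if_pos hlt, if_pos hc]
      rw [ht, if_pos hc, if_pos (by decide : ((some "L" == some "L") : Bool) = true)]
      rw [show ((i : Int) + 1) = ((i + 1 : Nat) : Int) by push_cast; ring]
      rw [tbA_eq s par hpar (i + 1) j hlt hj (acc ++ [(i : Int)])]
      simp
    · have ht : tb0 s i j = (j : Int) :: tb0 s i (j - 1) := by
        rw [tb0, if_pos hlt, if_neg hc]
      rw [ht, if_neg hc, if_neg (by simp)]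
      rw [show ((j : Int) - 1) = ((j - 1 : Nat) : Int) by omega]
      rw [tbA_eq s par hpar i (j - 1) (by omega) (by omega) (acc ++ [(j : Int)])]
      simp
  · have hij' : i = j := by omega
    subst hij'
    rw [dif_neg (by omega), if_pos (by simp), tb0, if_neg (by omega)]
termination_by j - i
decreasing_by all_goals omega

theorem upd_upd {α : Type} (t : List (List α)) (i j : Nat) (v w : α) :
    upd (upd t i j w) i j v = upd t i j v := by
  by_cases h : i < t.length
  · rw [upd, upd, upd, getD_set_ite, if_pos ⟨rfl, h⟩, List.set_set, List.set_set]
  · rw [upd, upd, upd, List.set_eq_of_length_le (show t.length ≤ i by omega)]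

-- A's segment_sums loop computes the prefix sums
theorem ssA_spec (s : List Int) (k : Nat) (hk : k ≤ s.length) :
    ((PySem.List.pyRange 1 ((s.length : Int) + 1) 1).foldl
      (fun ss i =>
        PySem.List.pySetD ss i (PySem.List.pyGetD ss (i - 1) 0 + PySem.List.pyGetD s (i - 1) 0))
      (List.replicate (s.length + 1) (0 : Int))).getD k 0 = psum s k := by
  have main := foldl_pyRange_inv 1 s.length
    (fun ss i =>
      PySem.List.pySetD ss i (PySem.List.pyGetD ss (i - 1) 0 + PySem.List.pyGetD s (i - 1) 0))
    (fun m r => r.length = s.length + 1 ∧ ∀ k, k ≤ m → r.getD k 0 = psum s k)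
    (List.replicate (s.length + 1) (0 : Int))
    (by
      refine ⟨by simp, fun k hk => ?_⟩
      interval_cases k
      simp [psum])
    (by
      intro m r hm hP
      simp only []
      rw [show (1 + (m : Int)) = ((m + 1 : Nat) : Int) by push_cast; ring]
      rw [show ((m + 1 : Nat) : Int) - 1 = ((m : Nat) : Int) by push_cast; ring]
      simp only [PySem.List.pySetD_natCast, PySem.List.pyGetD_natCast]
      refine ⟨by simp [hP.1], fun k hk => ?_⟩
      rw [getD_set_ite]
      by_cases hke : k = m + 1
      · rw [if_pos ⟨hke, by omega⟩, hke, psum_succ s m hm, hP.2 m (by omega)]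
      · rw [if_neg (by tauto)]
        exact hP.2 k (by omega))
  rw [show ((s.length : Int) + 1) = 1 + (s.length : Int) by ring]
  exact main.2 k hk

-- A's diagonal-fill loop
theorem baseA_spec (s : List Int) :
    RowsOk ((PySem.List.pyRange 0 ((s.length : Nat) : Int) 1).foldl
      (fun (st : List (List Int) × List (List (Option String))) i =>
        (PySem.List.pySetD st.1 i
           (PySem.List.pySetD (PySem.List.pyGetD st.1 i []) i (PySem.List.pyGetD s i 0)),
         PySem.List.pySetD st.2 i
           (PySem.List.pySetD (PySem.List.pyGetD st.2 i []) i (some "S"))))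
      (List.replicate s.length (List.replicate s.length (0 : Int)),
       List.replicate s.length (List.replicate s.length (none : Option String)))).1 s.length ∧
    RowsOk ((PySem.List.pyRange 0 ((s.length : Nat) : Int) 1).foldl
      (fun (st : List (List Int) × List (List (Option String))) i =>
        (PySem.List.pySetD st.1 i
           (PySem.List.pySetD (PySem.List.pyGetD st.1 i []) i (PySem.List.pyGetD s i 0)),
         PySem.List.pySetD st.2 i
           (PySem.List.pySetD (PySem.List.pyGetD st.2 i []) i (some "S"))))
      (List.replicate s.length (List.replicate s.length (0 : Int)),
       List.replicate s.length (List.replicate s.length (none : Option String)))).2 s.length ∧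
    GoodDp s ((PySem.List.pyRange 0 ((s.length : Nat) : Int) 1).foldl
      (fun (st : List (List Int) × List (List (Option String))) i =>
        (PySem.List.pySetD st.1 i
           (PySem.List.pySetD (PySem.List.pyGetD st.1 i []) i (PySem.List.pyGetD s i 0)),
         PySem.List.pySetD st.2 i
           (PySem.List.pySetD (PySem.List.pyGetD st.2 i []) i (some "S"))))
      (List.replicate s.length (List.replicate s.length (0 : Int)),
       List.replicate s.length (List.replicate s.length (none : Option String)))).1 1 := by
  have rep : ∀ (α : Type) (x : α), RowsOk (List.replicate s.length (List.replicate s.length x)) s.length := by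
    intro α x
    refine ⟨by simp, fun i hi => ?_⟩
    rw [List.getD, List.getElem?_replicate, if_pos hi]
    simp
  have main := foldl_pyRange_zero_inv s.length
    (fun (st : List (List Int) × List (List (Option String))) i =>
      (PySem.List.pySetD st.1 i
         (PySem.List.pySetD (PySem.List.pyGetD st.1 i []) i (PySem.List.pyGetD s i 0)),
       PySem.List.pySetD st.2 i
         (PySem.List.pySetD (PySem.List.pyGetD st.2 i []) i (some "S"))))
    (fun m st => RowsOk st.1 s.length ∧ RowsOk st.2 s.length ∧
      ∀ i, i < m → cellg 0 st.1 i i = s.getD i 0)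
    (List.replicate s.length (List.replicate s.length (0 : Int)),
     List.replicate s.length (List.replicate s.length (none : Option String)))
    ⟨rep Int 0, rep (Option String) none, by omega⟩
    (by
      intro m st hm hP
      obtain ⟨hP1, hP2, hP3⟩ := hP
      simp only [PySem.List.pySetD_natCast, PySem.List.pyGetD_natCast]
      refine ⟨rowsOk_upd _ _ _ _ _ hP1, rowsOk_upd _ _ _ _ _ hP2, fun i hi => ?_⟩
      by_cases hie : i = m
      · subst hie
        exact cellg_upd_self 0 st.1 s.length i i _ hP1 hm hm
      · exact (cellg_upd_other 0 st.1 m m i i _ (by omega)).trans (hP3 i (by omega)))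
  refine ⟨main.1, main.2.1, fun i j hij hj hL => ?_⟩
  have hij' : i = j := by omega
  subst hij'
  rw [F_diag]
  exact main.2.2 i hj

-- one iteration of A's inner fill loop, reduced to a two-cell update
theorem innerA_step (s ss : List Int)
    (hss : ∀ k, k ≤ s.length → ss.getD k 0 = psum s k)
    (m k : Nat) (hk : k + m + 1 < s.length)
    (st : List (List Int) × List (List (Option String)))
    (hdp : GoodDp s st.1 (m + 1)) :
    ((fun (st : List (List Int) × List (List (Option String))) (i : Int) =>
      let j := i + (2 + (m : Int)) - 1
      let total_left := PySem.List.pyGetD ss (j + 1) 0 - PySem.List.pyGetD ss i 0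
      let dpA := PySem.List.pySetD st.1 i
          (PySem.List.pySetD (PySem.List.pyGetD st.1 i []) j
            (total_left -
              min (PySem.List.pyGetD (PySem.List.pyGetD st.1 (i + 1) []) j 0)
                  (PySem.List.pyGetD (PySem.List.pyGetD st.1 i []) (j - 1) 0)))
      let left := PySem.List.pyGetD (PySem.List.pyGetD dpA (i + 1) []) j 0
      let right := PySem.List.pyGetD (PySem.List.pyGetD dpA i []) (j - 1) 0
      if left < right ∨ left = right then
        (PySem.List.pySetD dpA i
           (PySem.List.pySetD (PySem.List.pyGetD dpA i []) j (total_left - left)),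
         PySem.List.pySetD st.2 i
           (PySem.List.pySetD (PySem.List.pyGetD st.2 i []) j (some "L")))
      else
        (PySem.List.pySetD dpA i
           (PySem.List.pySetD (PySem.List.pyGetD dpA i []) j (total_left - right)),
         PySem.List.pySetD st.2 i
           (PySem.List.pySetD (PySem.List.pyGetD st.2 i []) j (some "R")))) st (k : Int))
    = (upd st.1 k (k + m + 1) (F s k (k + m + 1)),
       upd st.2 k (k + m + 1)
         (some (if F s (k + 1) (k + m + 1) ≤ F s k (k + m) then "L" else "R"))) := by
  have updI : ∀ (t : List (List Int)) (i j : Nat) (v : Int),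
      t.set i ((t.getD i []).set j v) = upd t i j v := fun _ _ _ _ => rfl
  have updP : ∀ (t : List (List (Option String))) (i j : Nat) (v : Option String),
      t.set i ((t.getD i []).set j v) = upd t i j v := fun _ _ _ _ => rfl
  have celI : ∀ (t : List (List Int)) (i j : Nat),
      (t.getD i []).getD j (0 : Int) = cellg 0 t i j := fun _ _ _ => rfl
  simp only []
  rw [show (k : Int) + (2 + (m : Int)) - 1 = ((k + m + 1 : Nat) : Int) by push_cast; ring]
  rw [show ((k + m + 1 : Nat) : Int) + 1 = ((k + m + 2 : Nat) : Int) by push_cast; ring]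
  rw [show ((k + m + 1 : Nat) : Int) - 1 = ((k + m : Nat) : Int) by push_cast; ring]
  rw [show (k : Int) + 1 = ((k + 1 : Nat) : Int) by push_cast; ring]
  simp only [PySem.List.pySetD_natCast, PySem.List.pyGetD_natCast]
  simp only [updI, updP, celI]
  have hL0 : cellg 0 st.1 (k + 1) (k + m + 1) = F s (k + 1) (k + m + 1) :=
    hdp (k + 1) (k + m + 1) (by omega) (by omega) (by omega)
  have hR0 : cellg 0 st.1 k (k + m) = F s k (k + m) :=
    hdp k (k + m) (by omega) (by omega) (by omega)
  have hs1 : ss.getD (k + m + 2) 0 = psum s (k + m + 2) := hss _ (by omega)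
  have hs2 : ss.getD k 0 = psum s k := hss _ (by omega)
  rw [hL0, hR0, hs1, hs2]
  have hL1 : ∀ v : Int, cellg 0 (upd st.1 k (k + m + 1) v) (k + 1) (k + m + 1)
      = F s (k + 1) (k + m + 1) := fun v =>
    (cellg_upd_other 0 st.1 k (k + m + 1) (k + 1) (k + m + 1) v (by omega)).trans hL0
  have hR1 : ∀ v : Int, cellg 0 (upd st.1 k (k + m + 1) v) k (k + m)
      = F s k (k + m) := fun v =>
    (cellg_upd_other 0 st.1 k (k + m + 1) k (k + m) v (by omega)).trans hR0
  rw [hL1, hR1]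
  have hF : F s k (k + m + 1)
      = psum s (k + m + 2) - psum s k - min (F s (k + 1) (k + m + 1)) (F s k (k + m)) := by
    rw [F_step s k (k + m + 1) (by omega)]
    rw [show k + m + 1 + 1 = k + m + 2 by omega, show k + m + 1 - 1 = k + m by omega]
  by_cases hc : F s (k + 1) (k + m + 1) ≤ F s k (k + m)
  · rw [if_pos (by omega), if_pos hc, upd_upd]
    rw [show psum s (k + m + 2) - psum s k - F s (k + 1) (k + m + 1)
        = F s k (k + m + 1) by rw [hF, min_eq_left hc]]
  · rw [if_neg (by omega), if_neg hc, upd_upd]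
    rw [show psum s (k + m + 2) - psum s k - F s k (k + m)
        = F s k (k + m + 1) by rw [hF, min_eq_right (by omega)]]

-- A's length-major fill loop computes F everywhere (and the parent cells record the tie rule)
theorem mainA_spec (s : List Int) (hn : 1 ≤ s.length)
    (ss : List Int) (hss : ∀ k, k ≤ s.length → ss.getD k 0 = psum s k)
    (st1 : List (List Int) × List (List (Option String)))
    (hd1 : RowsOk st1.1 s.length) (hp1 : RowsOk st1.2 s.length) (hg1 : GoodDp s st1.1 1) :
    ∀ st2 : List (List Int) × List (List (Option String)),
      st2 = (PySem.List.pyRange 2 ((s.length : Int) + 1) 1).foldl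
        (fun st length =>
          (PySem.List.pyRange 0 ((s.length : Int) - length + 1) 1).foldl
            (fun (st : List (List Int) × List (List (Option String))) i =>
              let j := i + length - 1
              let total_left := PySem.List.pyGetD ss (j + 1) 0 - PySem.List.pyGetD ss i 0
              let dpA := PySem.List.pySetD st.1 i
                  (PySem.List.pySetD (PySem.List.pyGetD st.1 i []) j
                    (total_left -
                      min (PySem.List.pyGetD (PySem.List.pyGetD st.1 (i + 1) []) j 0)
                          (PySem.List.pyGetD (PySem.List.pyGetD st.1 i []) (j - 1) 0)))
              let left := PySem.List.pyGetD (PySem.List.pyGetD dpA (i + 1) []) j 0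
              let right := PySem.List.pyGetD (PySem.List.pyGetD dpA i []) (j - 1) 0
              if left < right ∨ left = right then
                (PySem.List.pySetD dpA i
                   (PySem.List.pySetD (PySem.List.pyGetD dpA i []) j (total_left - left)),
                 PySem.List.pySetD st.2 i
                   (PySem.List.pySetD (PySem.List.pyGetD st.2 i []) j (some "L")))
              else
                (PySem.List.pySetD dpA i
                   (PySem.List.pySetD (PySem.List.pyGetD dpA i []) j (total_left - right)),
                 PySem.List.pySetD st.2 i
                   (PySem.List.pySetD (PySem.List.pyGetD st.2 i []) j (some "R"))))
            st)
        st1 →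
      RowsOk st2.1 s.length ∧ RowsOk st2.2 s.length ∧
        GoodDp s st2.1 s.length ∧ GoodPar s st2.2 s.length := by
  intro st2 hst2
  subst hst2
  rw [show ((s.length : Int) + 1) = 2 + ((s.length - 1 : Nat) : Int) by omega]
  have main := foldl_pyRange_inv 2 (s.length - 1)
    (fun st length =>
          (PySem.List.pyRange 0 ((s.length : Int) - length + 1) 1).foldl
            (fun (st : List (List Int) × List (List (Option String))) i =>
              let j := i + length - 1
              let total_left := PySem.List.pyGetD ss (j + 1) 0 - PySem.List.pyGetD ss i 0
              let dpA := PySem.List.pySetD st.1 i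
                  (PySem.List.pySetD (PySem.List.pyGetD st.1 i []) j
                    (total_left -
                      min (PySem.List.pyGetD (PySem.List.pyGetD st.1 (i + 1) []) j 0)
                          (PySem.List.pyGetD (PySem.List.pyGetD st.1 i []) (j - 1) 0)))
              let left := PySem.List.pyGetD (PySem.List.pyGetD dpA (i + 1) []) j 0
              let right := PySem.List.pyGetD (PySem.List.pyGetD dpA i []) (j - 1) 0
              if left < right ∨ left = right then
                (PySem.List.pySetD dpA i
                   (PySem.List.pySetD (PySem.List.pyGetD dpA i []) j (total_left - left)),
                 PySem.List.pySetD st.2 i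
                   (PySem.List.pySetD (PySem.List.pyGetD st.2 i []) j (some "L")))
              else
                (PySem.List.pySetD dpA i
                   (PySem.List.pySetD (PySem.List.pyGetD dpA i []) j (total_left - right)),
                 PySem.List.pySetD st.2 i
                   (PySem.List.pySetD (PySem.List.pyGetD st.2 i []) j (some "R"))))
            st)
    (fun m st => RowsOk st.1 s.length ∧ RowsOk st.2 s.length ∧
      GoodDp s st.1 (m + 1) ∧ GoodPar s st.2 (m + 1))
    st1
    ⟨hd1, hp1, hg1, fun i j hij hj hL => absurd hL (by omega)⟩
    (by
      intro m st hm hP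
      obtain ⟨hA, hB, hC, hD⟩ := hP
      beta_reduce
      rw [show ((s.length : Int) - (2 + (m : Int)) + 1) = ((s.length - m - 1 : Nat) : Int) by omega]
      have inner := foldl_pyRange_zero_inv (s.length - m - 1)
        (fun (st : List (List Int) × List (List (Option String))) (i : Int) =>
      let j := i + (2 + (m : Int)) - 1
      let total_left := PySem.List.pyGetD ss (j + 1) 0 - PySem.List.pyGetD ss i 0
      let dpA := PySem.List.pySetD st.1 i
          (PySem.List.pySetD (PySem.List.pyGetD st.1 i []) j
            (total_left -
              min (PySem.List.pyGetD (PySem.List.pyGetD st.1 (i + 1) []) j 0)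
                  (PySem.List.pyGetD (PySem.List.pyGetD st.1 i []) (j - 1) 0)))
      let left := PySem.List.pyGetD (PySem.List.pyGetD dpA (i + 1) []) j 0
      let right := PySem.List.pyGetD (PySem.List.pyGetD dpA i []) (j - 1) 0
      if left < right ∨ left = right then
        (PySem.List.pySetD dpA i
           (PySem.List.pySetD (PySem.List.pyGetD dpA i []) j (total_left - left)),
         PySem.List.pySetD st.2 i
           (PySem.List.pySetD (PySem.List.pyGetD st.2 i []) j (some "L")))
      else
        (PySem.List.pySetD dpA i
           (PySem.List.pySetD (PySem.List.pyGetD dpA i []) j (total_left - right)),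
         PySem.List.pySetD st.2 i
           (PySem.List.pySetD (PySem.List.pyGetD st.2 i []) j (some "R"))))
        (fun k st => RowsOk st.1 s.length ∧ RowsOk st.2 s.length ∧
          GoodDp s st.1 (m + 1) ∧ GoodPar s st.2 (m + 1) ∧
          ∀ i, i < k → (cellg 0 st.1 i (i + m + 1) = F s i (i + m + 1) ∧
            cellg none st.2 i (i + m + 1)
              = some (if F s (i + 1) (i + m + 1) ≤ F s i (i + m) then "L" else "R")))
        st
        ⟨hA, hB, hC, hD, fun i hi => absurd hi (by omega)⟩
        (by
          intro k st' hk hP'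
          obtain ⟨a, b, c, d, e⟩ := hP'
          rw [innerA_step s ss hss m k (by omega) st' c]
          refine ⟨rowsOk_upd _ _ _ _ _ a, rowsOk_upd _ _ _ _ _ b, ?_, ?_, ?_⟩
          · intro i j hij hj hL
            rw [cellg_upd_other 0 st'.1 k (k + m + 1) i j _ (by omega)]
            exact c i j hij hj hL
          · intro i j hij hj hL
            rw [cellg_upd_other none st'.2 k (k + m + 1) i j _ (by omega)]
            exact d i j hij hj hL
          · intro i hi
            by_cases hie : i = k
            · subst hie
              constructor
              · exact cellg_upd_self 0 st'.1 s.length i (i + m + 1) _ a (by omega) (by omega)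
              · exact cellg_upd_self none st'.2 s.length i (i + m + 1) _ b (by omega) (by omega)
            · constructor
              · rw [cellg_upd_other 0 st'.1 k (k + m + 1) i (i + m + 1) _ (by omega)]
                exact (e i (by omega)).1
              · rw [cellg_upd_other none st'.2 k (k + m + 1) i (i + m + 1) _ (by omega)]
                exact (e i (by omega)).2)
      obtain ⟨a, b, c, d, e⟩ := inner
      refine ⟨a, b, ?_, ?_⟩
      · intro i j hij hj hL
        by_cases hsm : j - i < m + 1
        · exact c i j hij hj hsm
        · obtain rfl : j = i + m + 1 := by omega
          exact (e i (by omega)).1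
      · intro i j hij hj hL
        by_cases hsm : j - i < m + 1
        · exact d i j hij hj hsm
        · obtain rfl : j = i + m + 1 := by omega
          rw [show i + m + 1 - 1 = i + m by omega]
          exact (e i (by omega)).2)
  obtain ⟨a, b, c, d⟩ := main
  rw [Nat.sub_add_cancel hn] at c d
  exact ⟨a, b, c, d⟩

theorem A_char (s : List Int) (hs : s ≠ []) :
    max_wood_traceback s
      = (F s 0 (s.length - 1), (tb0 s 0 (s.length - 1)).map (fun idx => idx + 1)) := by
  have hn : 1 ≤ s.length := List.length_pos_iff.mpr hs
  simp only [max_wood_traceback]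
  obtain ⟨hd1, hp1, hg1⟩ := baseA_spec s
  obtain ⟨a, b, c, d⟩ :=
    mainA_spec s hn _ (fun k hk => ssA_spec s k hk) _ hd1 hp1 hg1 _ rfl
  have hpar := fun i j hij hj => d i j hij hj (by omega)
  have horder := tbA_eq s _ hpar 0 (s.length - 1) (by omega) (by omega) []
  simp only [Nat.cast_zero] at horder
  rw [show ((s.length : Int) - 1) = ((s.length - 1 : Nat) : Int) by omega]
  rw [PySem.List.pyGetD_zero, PySem.List.pyGetD_natCast, horder]
  simp only [List.nil_append]
  exact congrArg (fun v => (v, (tb0 s 0 (s.length - 1)).map (fun idx => idx + 1)))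
    (c 0 (s.length - 1) (by omega) (by omega) (by omega))

-- B-side lemmas: diffD is twice F minus the range total
theorem psum_zero (s : List Int) : psum s 0 = 0 := by simp [psum]

theorem psum_len (s : List Int) : psum s s.length = s.sum := by simp [psum]

theorem diffD_eq (s : List Int) (i j : Nat) (hij : i ≤ j) (hj : j < s.length) :
    diffD s (i : Int) (j : Int) = 2 * F s i j - (psum s (j + 1) - psum s i) := by
  rw [diffD]
  by_cases hlt : i < j
  · rw [dif_pos (by exact_mod_cast hlt)]
    rw [show ((i : Int) + 1) = ((i + 1 : Nat) : Int) by push_cast; ring]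
    rw [show ((j : Int) - 1) = ((j - 1 : Nat) : Int) by omega]
    rw [diffD_eq s (i + 1) j hlt hj, diffD_eq s i (j - 1) (by omega) (by omega)]
    simp only [PySem.List.pyGetD_natCast]
    have hsi : s.getD i 0 = psum s (i + 1) - psum s i := by rw [psum_succ s i (by omega)]; ring
    have hsj : s.getD j 0 = psum s (j + 1) - psum s j := by rw [psum_succ s j hj]; ring
    rw [show j - 1 + 1 = j by omega] at *
    rw [hsi, hsj, F_step s i j hlt]
    rcases le_total (F s (i + 1) j) (F s i (j - 1)) with hc | hc
    · rw [min_eq_left hc, max_eq_left (by omega)]; ring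
    · rw [min_eq_right hc, max_eq_right (by omega)]; ring
  · have hij' : i = j := by omega
    subst hij'
    rw [dif_neg (by omega), F_diag, PySem.List.pyGetD_natCast,
      psum_succ s i (by omega)]
    ring
termination_by j - i
decreasing_by all_goals omega

-- the traceback comparison of B is the tie rule of tb0
theorem tbB_eq (s : List Int) (i j : Nat) (hij : i ≤ j) (hj : j < s.length) (acc : List Int) :
    tbB s (i : Int) (j : Int) acc = acc ++ (tb0 s i j).map (fun idx => idx + 1) := by
  rw [tbB]
  by_cases hlt : i < j
  · rw [dif_pos (by exact_mod_cast hlt)]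
    have e1 : PySem.List.pyGetD s (i : Int) 0 - diffD s ((i : Int) + 1) (j : Int)
        = (psum s (j + 1) - psum s i) - 2 * F s (i + 1) j := by
      rw [show ((i : Int) + 1) = ((i + 1 : Nat) : Int) by push_cast; ring,
        diffD_eq s (i + 1) j hlt hj, PySem.List.pyGetD_natCast,
        show s.getD i 0 = psum s (i + 1) - psum s i by rw [psum_succ s i (by omega)]; ring]
      ring
    have e2 : PySem.List.pyGetD s (j : Int) 0 - diffD s (i : Int) ((j : Int) - 1)
        = (psum s (j + 1) - psum s i) - 2 * F s i (j - 1) := by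
      rw [show ((j : Int) - 1) = ((j - 1 : Nat) : Int) by omega,
        diffD_eq s i (j - 1) (by omega) (by omega), PySem.List.pyGetD_natCast,
        show s.getD j 0 = psum s (j + 1) - psum s j by rw [psum_succ s j hj]; ring,
        show j - 1 + 1 = j by omega]
      ring
    rw [e1, e2]
    by_cases hc : F s (i + 1) j ≤ F s i (j - 1)
    · have ht : tb0 s i j = (i : Int) :: tb0 s (i + 1) j := by
        rw [tb0, if_pos hlt, if_pos hc]
      rw [ht, if_pos (by omega)]
      rw [show ((i : Int) + 1) = ((i + 1 : Nat) : Int) by push_cast; ring]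
      rw [tbB_eq s (i + 1) j hlt hj (acc ++ [((i + 1 : Nat) : Int)])]
      simp
    · have ht : tb0 s i j = (j : Int) :: tb0 s i (j - 1) := by
        rw [tb0, if_pos hlt, if_neg hc]
      rw [ht, if_neg (by omega)]
      rw [show ((j : Int) - 1) = ((j - 1 : Nat) : Int) by omega]
      rw [tbB_eq s i (j - 1) (by omega) (by omega) (acc ++ [(j : Int) + 1])]
      simp
  · have hij' : i = j := by omega
    subst hij'
    rw [dif_neg (by omega), tb0, if_neg (by omega)]
    simp
termination_by j - i
decreasing_by all_goals omega

theorem B_char (s : List Int) (hs : s ≠ []) :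
    max_wood_traceback_alt s
      = (F s 0 (s.length - 1), (tb0 s 0 (s.length - 1)).map (fun idx => idx + 1)) := by
  have hn : 1 ≤ s.length := List.length_pos_iff.mpr hs
  simp only [max_wood_traceback_alt]
  have hcast : ((s.length : Int) - 1) = ((s.length - 1 : Nat) : Int) := by omega
  have hd : diffD s 0 ((s.length : Int) - 1)
      = 2 * F s 0 (s.length - 1) - s.sum := by
    rw [hcast, show (0 : Int) = ((0 : Nat) : Int) by norm_num,
      diffD_eq s 0 (s.length - 1) (by omega) (by omega),
      show s.length - 1 + 1 = s.length by omega, psum_len, psum_zero]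
    ring
  have horder := tbB_eq s 0 (s.length - 1) (by omega) (by omega) []
  simp only [Nat.cast_zero] at horder
  rw [← hcast] at horder
  rw [hd, horder]
  have hval : PySem.Int.floordiv (s.sum + (2 * F s 0 (s.length - 1) - s.sum)) 2
      = F s 0 (s.length - 1) := by
    rw [show s.sum + (2 * F s 0 (s.length - 1) - s.sum) = 2 * F s 0 (s.length - 1) by ring,
      PySem.Int.floordiv_eq_ediv_of_pos (by omega)]
    omega
  rw [hval]
  simp only [List.nil_append]
-- ===== VERDICT (by name: the statement is the Claim_ definition above) =====
theorem max_wood_traceback_spec : Claim_equal_max_wood_traceback := by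
  intro segments _hdom hpre
  unfold Spec_max_wood_traceback
  rw [A_char segments hpre, B_char segments hpre]
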